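-- pv_equiv track=rewrite | github.com/JonasLueg/waldspaces-complete | tests/test_structure_help.py | make_splits
-- ===== SOURCE A (Python) =====
-- def make_splits(collection):
--     """ Generates all possible splits of a collection."""
--     if len(collection) <= 1:
--         raise ValueError("The collection must have 2 elements or more.")
--     if len(collection) == 2:
--         yield ((collection[0],), (collection[1],))
--     else:
--         last = collection[-1]
--         for split in make_splits(collection[:-1]):
--             yield (split[0], split[1] + (last,))
--             yield (split[0] + (last,), split[1])
--         yield (tuple(collection[:-1]), (last,))
-- ===== SOURCE B (Python) =====
-- def make_splits(collection):
--     """ Generates all possible splits of a collection."""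
--     if len(collection) <= 1:
--         raise ValueError("The collection must have 2 elements or more.")
--     splits = [((collection[0],), (collection[1],))]
--     for i in range(2, len(collection)):
--         last = collection[i]
--         new = []
--         for s0, s1 in splits:
--             new.append((s0, s1 + (last,)))
--             new.append((s0 + (last,), s1))
--         new.append((tuple(collection[:i]), (last,)))
--         splits = new
--     yield from splits
-- ===== Notes on version B (the rewrite author's own statement) =====
-- stated objective: alternative
-- what changed: Replaces A's recursion on the list's init (recursive generator re-entered per level) with a single bottom-up loop over indices 2..len-1 that rebuilds the split list in place; identical yield order and lazy ValueError.
import Mathlib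
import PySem

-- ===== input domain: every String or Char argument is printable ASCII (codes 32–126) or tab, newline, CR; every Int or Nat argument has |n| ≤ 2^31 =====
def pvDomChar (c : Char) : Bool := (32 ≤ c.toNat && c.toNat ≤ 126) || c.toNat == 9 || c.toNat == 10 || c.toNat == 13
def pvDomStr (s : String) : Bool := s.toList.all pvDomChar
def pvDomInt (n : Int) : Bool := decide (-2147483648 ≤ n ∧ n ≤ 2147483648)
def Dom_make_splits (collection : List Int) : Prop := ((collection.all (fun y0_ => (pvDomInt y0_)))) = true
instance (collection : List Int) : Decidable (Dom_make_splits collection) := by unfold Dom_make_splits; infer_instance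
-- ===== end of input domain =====

-- B replaces A's recursion on the list's init with one bottom-up loop over indices 2..len-1 (alternative decomposition, same cost).
-- ===== PORT A =====
-- A recurses on collection[:-1]; ValueError for len ≤ 1 is excluded by Pre_ (the port returns [] there).
def make_splits (collection : List Int) : List (List Int × List Int) :=
  if collection.length ≤ 1 then []
  else if collection.length = 2 then
    [([collection.getD 0 0], [collection.getD 1 0])]
  else
    let last := collection.getD (collection.length - 1) 0
    ((make_splits collection.dropLast).flatMap
      (fun split => [(split.1, split.2 ++ [last]), (split.1 ++ [last], split.2)]))
    ++ [(collection.dropLast, [last])]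
termination_by collection.length
decreasing_by
  simp only [List.length_dropLast]; omega

-- ===== PORT B =====
-- one iteration of B's outer loop: rebuild `splits` for index i (last = collection[i])
def altStep (c : List Int) (acc : List (List Int × List Int)) (i : Int) :
    List (List Int × List Int) :=
  let last := PySem.List.pyGetD c i 0
  (acc.foldl (fun new s => new ++ [(s.1, s.2 ++ [last]), (s.1 ++ [last], s.2)]) [])
  ++ [(c.take i.toNat, [last])]

def make_splits_alt (collection : List Int) : List (List Int × List Int) :=
  if collection.length ≤ 1 then []
  else
    (PySem.List.pyRange 2 collection.length 1).foldl (altStep collection)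
      [([collection.getD 0 0], [collection.getD 1 0])]

-- ===== PRECONDITION & SPEC =====
-- Pre_ excludes exactly the inputs (len ≤ 1) on which Python A raises ValueError on iteration.
def Pre_make_splits (collection : List Int) : Prop := 2 ≤ collection.length
instance (collection : List Int) : Decidable (Pre_make_splits collection) := by
  unfold Pre_make_splits; infer_instance
def pvWitness_make_splits : List Int := [1, 2, 3]

def Spec_make_splits (collection : List Int) (out : List (List Int × List Int)) : Prop := out = make_splits_alt collection
instance (collection : List Int) (out : List (List Int × List Int)) : Decidable (Spec_make_splits collection out) := by unfold Spec_make_splits; infer_instance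

-- ===== CLAIM (what is proved, stated in full; the proofs are below) =====
def Claim_equal_make_splits : Prop := ∀ (collection : List Int), Dom_make_splits collection → Pre_make_splits collection → Spec_make_splits collection (make_splits collection)

-- ===== LEMMAS AND PROOFS =====

lemma altStep_flatMap (c : List Int) (acc : List (List Int × List Int)) (i : Int) :
    altStep c acc i =
      (acc.flatMap (fun s => [(s.1, s.2 ++ [PySem.List.pyGetD c i 0]),
                              (s.1 ++ [PySem.List.pyGetD c i 0], s.2)]))
      ++ [(c.take i.toNat, [PySem.List.pyGetD c i 0])] := by
  simp only [altStep]
  rw [PySem.List.foldl_append_eq_flatMap]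
  simp

lemma make_splits_key (c : List Int) : ∀ (k : Nat), 2 ≤ k → k ≤ c.length →
    make_splits (c.take k) =
      (PySem.List.pyRange 2 (k : Int) 1).foldl (altStep c)
        [([c.getD 0 0], [c.getD 1 0])] := by
  intro k
  induction k with
  | zero => omega
  | succ k ih =>
    intro h2 hle
    by_cases hk2 : k + 1 = 2
    · have hk : k = 1 := by omega
      subst hk
      have h2c : 2 ≤ c.length := by omega
      obtain ⟨a, b, rest, rfl⟩ : ∃ a b rest, c = a :: b :: rest := by
        match c, h2c with | a :: b :: rest, _ => exact ⟨a, b, rest, rfl⟩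
      rw [make_splits]
      rw [PySem.List.pyRange_one_eq_nil (by norm_num)]
      simp [List.getD]
    · -- k + 1 ≥ 3: peel the last loop iteration
      have hk2' : 2 ≤ k := by omega
      have hklt : k < c.length := by omega
      have htake : c.take (k+1) = c.take k ++ [c.getD k 0] := by
        rw [List.take_add_one]
        simp [List.getElem?_eq_getElem hklt, List.getD_eq_getElem?_getD]
      have hlen : (c.take (k+1)).length = k + 1 := by simp; omega
      have hlenk : (c.take k).length = k := by simp; omega
      rw [make_splits]
      simp only [hlen]
      rw [if_neg (by omega : ¬ (k + 1 ≤ 1)), if_neg hk2]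
      have hdrop : (c.take (k+1)).dropLast = c.take k := by rw [htake]; simp
      have hlast : (c.take (k+1)).getD ((c.take (k+1)).length - 1) 0 = c.getD k 0 := by
        rw [hlen, htake]
        have hsub : k + 1 - 1 = k := by omega
        rw [hsub, List.getD_eq_getElem?_getD, List.getElem?_append_right (by omega)]
        simp [hlenk]
      rw [hlen] at hlast
      rw [hdrop, hlast]
      have hrange : PySem.List.pyRange 2 ((k+1 : Nat) : Int) 1
          = PySem.List.pyRange 2 (k : Int) 1 ++ [(k : Int)] := by
        push_cast
        exact PySem.List.pyRange_one_succ_right (by exact_mod_cast hk2')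
      rw [hrange, List.foldl_append, List.foldl_cons, List.foldl_nil,
          ← ih hk2' (by omega)]
      rw [altStep_flatMap]
      have hpg : PySem.List.pyGetD c (k : Int) 0 = c.getD k 0 := by
        exact PySem.List.pyGetD_natCast c k 0
      have htoNat : ((k : Int)).toNat = k := by omega
      rw [hpg, htoNat]

theorem make_splits_spec : Claim_equal_make_splits := by
  intro c _ hpre
  unfold Spec_make_splits make_splits_alt
  have hlen : ¬ (c.length ≤ 1) := by
    unfold Pre_make_splits at hpre; omega
  simp only [hlen, if_false]
  have := make_splits_key c c.length (by unfold Pre_make_splits at hpre; omega) le_rfl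
  rw [List.take_length] at this
  exact this
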